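-- pv_equiv track=rewrite | github.com/Jaws540/LRk-Parser | parser_table_gen.py | collect_actions_and_gotos
-- ===== SOURCE A (Python) =====
-- def is_non_terminal(part):
--     if part[0] == '<' and part[-1] == '>':
--         return False
--     return True
--
-- def collect_actions_and_gotos(grammar):
--     actions = ['<EOF>', '<ALL>']
--     gotos = []
--
--     for production in grammar:
--         for part in production:
--             if part != 'S`':
--                 if is_non_terminal(part):
--                     if part not in gotos:
--                         gotos.append(part)
--                 else:
--                     if part not in actions:
--                         actions.append(part)
--     return (actions, gotos)
-- ===== SOURCE B (Python) =====
-- def is_non_terminal(part):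
--     if part[0] == '<' and part[-1] == '>':
--         return False
--     return True
--
-- def collect_actions_and_gotos(grammar):
--     # flatten once, dropping the start symbol
--     flat = [p for production in grammar for p in production if p != 'S`']
--     # two independent comprehension passes, one per output list
--     gotos = list(dict.fromkeys(p for p in flat if is_non_terminal(p)))
--     actions = ['<EOF>', '<ALL>'] + list(dict.fromkeys(
--         p for p in flat
--         if not is_non_terminal(p) and p != '<EOF>' and p != '<ALL>'))
--     return (actions, gotos)
-- ===== Notes on version B (the rewrite author's own statement) =====
-- stated objective: faster
-- what changed: Replaces A's single interleaved dedup-and-partition loop (linear membership scans of the growing result lists) by a flatten pass plus two independent filter+dict.fromkeys comprehension passes, one building gotos and one building actions, with hash-based dedup.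
-- outside the precondition, e.g. on collect_actions_and_gotos([['']]): A raises IndexError, B raises IndexError
import Mathlib
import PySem

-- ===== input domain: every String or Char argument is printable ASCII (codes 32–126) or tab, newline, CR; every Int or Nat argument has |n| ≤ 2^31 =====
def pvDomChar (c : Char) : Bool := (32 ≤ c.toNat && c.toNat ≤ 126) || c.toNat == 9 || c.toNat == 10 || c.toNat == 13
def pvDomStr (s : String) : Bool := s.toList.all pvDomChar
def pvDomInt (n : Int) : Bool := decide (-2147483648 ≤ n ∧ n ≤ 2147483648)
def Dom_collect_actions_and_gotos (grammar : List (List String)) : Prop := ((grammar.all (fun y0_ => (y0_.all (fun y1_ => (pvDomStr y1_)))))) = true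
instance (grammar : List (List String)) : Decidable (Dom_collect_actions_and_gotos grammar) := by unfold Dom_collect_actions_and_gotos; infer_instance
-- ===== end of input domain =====

-- B replaces A's interleaved dedup-and-partition loop by a flatten pass and two
-- independent filter+dedup comprehension passes, one per output list (measured faster: hash dedup).

-- ===== PORT A =====
-- part[0] / part[-1] via PySem.Str.pyGet?; on "" Python raises IndexError (excluded by Pre_).
def is_non_terminal (part : String) : Bool :=
  if PySem.Str.pyGet? part 0 == some '<' && PySem.Str.pyGet? part (-1) == some '>' then false
  else true

-- the body of A's inner loop, state = (actions, gotos)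
def pvStepA (st : List String × List String) (part : String) : List String × List String :=
  if part ≠ "S`" then
    if is_non_terminal part then
      if part ∈ st.2 then st else (st.1, st.2 ++ [part])
    else
      if part ∈ st.1 then st else (st.1 ++ [part], st.2)
  else st

def collect_actions_and_gotos (grammar : List (List String)) : List String × List String :=
  grammar.foldl (fun st production => production.foldl pvStepA st) (["<EOF>", "<ALL>"], [])

-- ===== PORT B =====
def collect_actions_and_gotos_alt (grammar : List (List String)) : List String × List String :=
  -- flatten once, dropping the start symbol
  let flat := grammar.flatMap (fun production => production.filter (fun p => p ≠ "S`"))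
  -- two independent comprehension passes (list(dict.fromkeys(...)) = PySem.List.dedup)
  let gotos := PySem.List.dedup (flat.filter (fun p => is_non_terminal p))
  let actions := ["<EOF>", "<ALL>"] ++
    PySem.List.dedup (flat.filter (fun p => !(is_non_terminal p) && p ≠ "<EOF>" && p ≠ "<ALL>"))
  (actions, gotos)

-- ===== PRECONDITION & SPEC =====
-- Pre_ excludes grammars containing an empty-string part, on which Python A raises
-- IndexError in is_non_terminal (B raises the same there); nothing else is excluded.
def Pre_collect_actions_and_gotos (grammar : List (List String)) : Prop :=
  ∀ production ∈ grammar, ∀ p ∈ production, p ≠ ""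
instance (grammar : List (List String)) : Decidable (Pre_collect_actions_and_gotos grammar) := by
  unfold Pre_collect_actions_and_gotos; infer_instance

def pvWitness_collect_actions_and_gotos : List (List String) :=
  [["S`", "E"], ["E", "E", "<+>", "<id>"], ["E", "<id>"]]

def Spec_collect_actions_and_gotos (grammar : List (List String)) (out : List String × List String) : Prop := out = collect_actions_and_gotos_alt grammar
instance (grammar : List (List String)) (out : List String × List String) : Decidable (Spec_collect_actions_and_gotos grammar out) := by unfold Spec_collect_actions_and_gotos; infer_instance

-- ===== CLAIM (what is proved, stated in full; the proofs are below) =====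
def Claim_equal_collect_actions_and_gotos : Prop := ∀ (grammar : List (List String)), Dom_collect_actions_and_gotos grammar → Pre_collect_actions_and_gotos grammar → Spec_collect_actions_and_gotos grammar (collect_actions_and_gotos grammar)

-- ===== LEMMAS AND PROOFS =====

-- the two classification filters and the state A reaches from a unique table u
def pvFT (p : String) : Bool := !(p == "<EOF>" || p == "<ALL>") && !(is_non_terminal p)
def pvFN (p : String) : Bool := !(p == "<EOF>" || p == "<ALL>") && is_non_terminal p

def pvCl (u : List String) : List String × List String :=
  (["<EOF>", "<ALL>"] ++ u.filter pvFT, u.filter pvFN)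

theorem pv_nonterm_ne_seed {p : String} (h : is_non_terminal p = true) :
    p ≠ "<EOF>" ∧ p ≠ "<ALL>" := by
  constructor <;> rintro rfl <;> revert h <;> decide

theorem pv_stepA_add (u : List String) (p : String) (hp : p ≠ "S`") :
    pvStepA (pvCl u) p = pvCl (PySem.Set.add u p) := by
  by_cases hu : p ∈ u
  · have hadd : PySem.Set.add u p = u := by
      simp [PySem.Set.add, hu]
    rw [hadd]
    by_cases hn : is_non_terminal p
    · obtain ⟨h1, h2⟩ := pv_nonterm_ne_seed hn
      have hmem : p ∈ (pvCl u).2 := by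
        simp [pvCl, List.mem_filter, pvFN, hu, hn, h1, h2]
      simp [pvStepA, hp, hn, hmem]
    · simp at hn
      by_cases hs : p = "<EOF>" ∨ p = "<ALL>"
      · have hmem : p ∈ (pvCl u).1 := by
          rcases hs with rfl | rfl <;> simp [pvCl]
        simp [pvStepA, hp, hn, hmem]
      · simp only [not_or] at hs
        have hmem : p ∈ (pvCl u).1 := by
          simp [pvCl, List.mem_filter, pvFT, hu, hn, hs.1, hs.2]
        simp [pvStepA, hp, hn, hmem]
  · have hadd : PySem.Set.add u p = u ++ [p] := by
      simp [PySem.Set.add, hu]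
    rw [hadd]
    by_cases hn : is_non_terminal p
    · obtain ⟨h1, h2⟩ := pv_nonterm_ne_seed hn
      have hmem : p ∉ (pvCl u).2 := by
        simp [pvCl, List.mem_filter, hu]
      have hT : pvFT p = false := by simp [pvFT, hn]
      have hN : pvFN p = true := by simp [pvFN, hn, h1, h2]
      simp [pvStepA, hp, hn, pvCl, List.filter_append, hT, hN, hu]
    · simp at hn
      by_cases hs : p = "<EOF>" ∨ p = "<ALL>"
      · have hmem : p ∈ (pvCl u).1 := by
          rcases hs with rfl | rfl <;> simp [pvCl]
        have hT : pvFT p = false := by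
          rcases hs with rfl | rfl <;> simp [pvFT]
        have hN : pvFN p = false := by
          rcases hs with rfl | rfl <;> simp [pvFN]
        simp only [pvStepA, hn, hmem, Bool.false_eq_true, ite_false]
        simp [pvCl, List.filter_append, hT, hN, hp]
      · simp only [not_or] at hs
        have hmem : p ∉ (pvCl u).1 := by
          simp [pvCl, List.mem_filter, hu, hs.1, hs.2]
        have hT : pvFT p = true := by simp [pvFT, hn, hs.1, hs.2]
        have hN : pvFN p = false := by simp [pvFN, hn]
        simp [pvStepA, hp, hn, pvCl, List.filter_append, hT, hN]
        tauto

theorem pv_fold_main (ps : List String) : ∀ u : List String, (∀ p ∈ ps, p ≠ "S`") →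
    ps.foldl pvStepA (pvCl u) = pvCl (ps.foldl PySem.Set.add u) := by
  induction ps with
  | nil => simp
  | cons p ps ih =>
    intro u hps
    have hp : p ≠ "S`" := hps p (by simp)
    simp only [List.foldl_cons, pv_stepA_add u p hp]
    exact ih _ (fun q hq => hps q (by simp [hq]))

theorem pv_filter_drop (l : List String) : ∀ st,
    l.foldl pvStepA st = (l.filter (fun p => p ≠ "S`")).foldl pvStepA st := by
  induction l with
  | nil => simp
  | cons p l ih =>
    intro st
    by_cases hp : p = "S`"
    · subst hp
      simp only [List.foldl_cons]
      rw [show pvStepA st "S`" = st from by simp [pvStepA]]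
      simpa using ih st
    · simp only [List.filter_cons, List.foldl_cons]
      simp only [hp, decide_true, ne_eq, not_false_iff]
      simpa [hp] using ih (pvStepA st p)

theorem pv_outer (grammar : List (List String)) : ∀ st,
    grammar.foldl (fun st production => production.foldl pvStepA st) st
      = (grammar.flatMap (fun production => production.filter (fun p => p ≠ "S`"))).foldl pvStepA st := by
  induction grammar with
  | nil => simp
  | cons prod rest ih =>
    intro st
    simp only [List.foldl_cons, List.flatMap_cons, List.foldl_append]
    rw [← pv_filter_drop prod st]
    exact ih _

-- ordered dedup commutes with filtering
theorem pv_filter_foldl_add (f : String → Bool) (l : List String) : ∀ s : List String,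
    (l.foldl PySem.Set.add s).filter f = (l.filter f).foldl PySem.Set.add (s.filter f) := by
  induction l with
  | nil => simp
  | cons p l ih =>
    intro s
    by_cases hf : f p = true
    · simp only [List.foldl_cons, List.filter_cons, hf, if_true]
      rw [ih]
      congr 1
      by_cases hs : p ∈ s
      · have hm : p ∈ s.filter f := List.mem_filter.mpr ⟨hs, hf⟩
        simp [PySem.Set.add, hs, hm]
      · have hm : p ∉ s.filter f := fun h => hs (List.mem_filter.mp h).1
        simp [PySem.Set.add, hs, hm, List.filter_append, hf]
    · have hf' : f p = false := by simpa using hf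
      simp only [List.foldl_cons, List.filter_cons, hf', Bool.false_eq_true, if_false]
      rw [ih]
      congr 1
      by_cases hs : p ∈ s
      · simp [PySem.Set.add, hs]
      · simp [PySem.Set.add, hs, List.filter_append, hf']

theorem pv_filter_dedup (f : String → Bool) (l : List String) :
    (PySem.List.dedup l).filter f = PySem.List.dedup (l.filter f) := by
  have h := pv_filter_foldl_add f l []
  simpa [PySem.List.dedup, PySem.Set.ofList, PySem.Set.empty] using h

theorem pv_FN_eq : pvFN = fun p => is_non_terminal p := by
  funext p
  by_cases hn : is_non_terminal p
  · obtain ⟨h1, h2⟩ := pv_nonterm_ne_seed hn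
    simp [pvFN, hn, h1, h2]
  · simp at hn
    simp [pvFN, hn]

theorem pv_FT_eq : pvFT = fun p => !(is_non_terminal p) && p ≠ "<EOF>" && p ≠ "<ALL>" := by
  funext p
  by_cases hn : is_non_terminal p
  · simp [pvFT, hn]
  · simp at hn
    simp only [pvFT, hn, Bool.not_false, Bool.and_true]
    by_cases h1 : p = "<EOF>" <;> by_cases h2 : p = "<ALL>" <;> simp [h1, h2, Bool.and_comm]

-- ===== VERDICT (by name: the statement is the Claim_ definition above) =====
theorem collect_actions_and_gotos_spec : Claim_equal_collect_actions_and_gotos := by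
  intro grammar _ _
  show collect_actions_and_gotos grammar = collect_actions_and_gotos_alt grammar
  unfold collect_actions_and_gotos collect_actions_and_gotos_alt
  set flat := grammar.flatMap (fun production => production.filter (fun p => p ≠ "S`")) with hflat
  have hns : ∀ p ∈ flat, p ≠ "S`" := by
    intro p hp
    rw [hflat] at hp
    simp only [List.mem_flatMap, List.mem_filter] at hp
    obtain ⟨_, _, _, h⟩ := hp
    simpa using h
  have hinit : (["<EOF>", "<ALL>"], ([] : List String)) = pvCl [] := by simp [pvCl]
  have hded : flat.foldl PySem.Set.add [] = PySem.List.dedup flat := by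
    simp [PySem.List.dedup, PySem.Set.ofList, PySem.Set.empty]
  rw [pv_outer, hinit, pv_fold_main flat [] hns, hded]
  simp only [pvCl, pv_filter_dedup, pv_FN_eq, pv_FT_eq]
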